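-- pv_equiv track=rewrite | github.com/stascrash/codeeval | lucky_tickets4.py | calcSums
-- ===== SOURCE A (Python) =====
-- def calcSums(maxsum, prevSums):
-- 	results = []
-- 	for s in range(0, maxsum + 1):
-- 		result = 0
-- 		for s1 in range(10):
-- 			s2 = s - s1
-- 			if s2 < 0:
-- 				continue
-- 			if s2 >= len(prevSums):
-- 				continue
-- 			result += prevSums[s2]
-- 		results.append(result)
-- 	return results
-- ===== SOURCE B (Python) =====
-- def calcSums(maxsum, prevSums):
--     n = len(prevSums)
--     results = []
--     acc = 0
--     for s in range(0, maxsum + 1):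
--         if 0 <= s < n:
--             acc += prevSums[s]
--         if 0 <= s - 10 < n:
--             acc -= prevSums[s - 10]
--         results.append(acc)
--     return results
-- ===== Notes on version B (the rewrite author's own statement) =====
-- stated objective: faster
-- what changed: Replaces the nested 10-iteration inner loop with a single pass maintaining a running sliding-window sum (add prevSums[s], evict prevSums[s-10]).
import Mathlib
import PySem

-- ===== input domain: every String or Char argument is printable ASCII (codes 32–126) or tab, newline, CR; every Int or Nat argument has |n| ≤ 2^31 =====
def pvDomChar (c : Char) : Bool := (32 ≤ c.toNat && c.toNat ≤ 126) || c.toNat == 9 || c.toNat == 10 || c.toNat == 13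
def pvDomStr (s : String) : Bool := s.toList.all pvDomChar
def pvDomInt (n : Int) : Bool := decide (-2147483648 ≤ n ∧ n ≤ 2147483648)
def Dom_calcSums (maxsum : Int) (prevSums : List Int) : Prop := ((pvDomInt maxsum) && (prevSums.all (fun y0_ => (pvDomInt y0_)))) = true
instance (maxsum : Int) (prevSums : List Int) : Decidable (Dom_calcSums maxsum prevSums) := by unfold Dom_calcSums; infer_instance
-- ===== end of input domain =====

-- B replaces A's nested 10-term inner loop by a single pass with a running sliding-window sum (constant-factor faster).

-- ===== PORT A =====
-- inner 'for s1 in range(10)' loop of A, kept as a helper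
def calcSumsInner (prevSums : List Int) (s : Int) : Int :=
  (PySem.List.pyRange 0 10 1).foldl (fun result s1 =>
    let s2 := s - s1
    if s2 < 0 then result
    else if s2 ≥ PySem.List.len prevSums then result
    else result + PySem.List.pyGetD prevSums s2 0) 0

def calcSums (maxsum : Int) (prevSums : List Int) : List Int :=
  (PySem.List.pyRange 0 (maxsum + 1) 1).foldl (fun results s =>
    results ++ [calcSumsInner prevSums s]) []

-- ===== PORT B =====
-- body of B's single loop: conditionally add prevSums[s], evict prevSums[s-10], append acc
def calcSumsAltStep (prevSums : List Int) (st : Int × List Int) (s : Int) : Int × List Int :=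
  let acc1 := if 0 ≤ s ∧ s < PySem.List.len prevSums then st.1 + PySem.List.pyGetD prevSums s 0 else st.1
  let acc2 := if 0 ≤ s - 10 ∧ s - 10 < PySem.List.len prevSums then acc1 - PySem.List.pyGetD prevSums (s - 10) 0 else acc1
  (acc2, st.2 ++ [acc2])

def calcSums_alt (maxsum : Int) (prevSums : List Int) : List Int :=
  ((PySem.List.pyRange 0 (maxsum + 1) 1).foldl (calcSumsAltStep prevSums)
    ((0 : Int), ([] : List Int))).2

-- ===== PRECONDITION & SPEC =====
def Spec_calcSums (maxsum : Int) (prevSums : List Int) (out : List Int) : Prop := out = calcSums_alt maxsum prevSums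
instance (maxsum : Int) (prevSums : List Int) (out : List Int) : Decidable (Spec_calcSums maxsum prevSums out) := by unfold Spec_calcSums; infer_instance

-- ===== CLAIM (what is proved, stated in full; the proofs are below) =====
def Claim_equal_calcSums : Prop := ∀ (maxsum : Int) (prevSums : List Int), Dom_calcSums maxsum prevSums → Spec_calcSums maxsum prevSums (calcSums maxsum prevSums)

-- ===== LEMMAS AND PROOFS =====

-- pvG xs x = xs[x] if the index is in range, else 0 (contribution of index x)
def pvG (xs : List Int) (x : Int) : Int :=
  if 0 ≤ x ∧ x < PySem.List.len xs then PySem.List.pyGetD xs x 0 else 0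

-- window sum of the 10 indices s, s-1, …, s-9 (clipped)
def pvW (xs : List Int) (s : Int) : Int :=
  pvG xs s + pvG xs (s - 1) + pvG xs (s - 2) + pvG xs (s - 3) + pvG xs (s - 4) +
  pvG xs (s - 5) + pvG xs (s - 6) + pvG xs (s - 7) + pvG xs (s - 8) + pvG xs (s - 9)

theorem pvG_neg (xs : List Int) (x : Int) (hx : x < 0) : pvG xs x = 0 := by
  unfold pvG; rw [if_neg]; omega

theorem pvW_neg_one (xs : List Int) : pvW xs (-1) = 0 := by
  unfold pvW
  rw [pvG_neg xs _ (by omega), pvG_neg xs _ (by omega), pvG_neg xs _ (by omega),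
      pvG_neg xs _ (by omega), pvG_neg xs _ (by omega), pvG_neg xs _ (by omega),
      pvG_neg xs _ (by omega), pvG_neg xs _ (by omega), pvG_neg xs _ (by omega),
      pvG_neg xs _ (by omega)]
  ring

theorem pvW_step (xs : List Int) (s : Int) :
    pvW xs s = pvW xs (s - 1) + pvG xs s - pvG xs (s - 10) := by
  unfold pvW
  have h2 : s - 1 - 1 = s - 2 := by ring
  have h3 : s - 1 - 2 = s - 3 := by ring
  have h4 : s - 1 - 3 = s - 4 := by ring
  have h5 : s - 1 - 4 = s - 5 := by ring
  have h6 : s - 1 - 5 = s - 6 := by ring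
  have h7 : s - 1 - 6 = s - 7 := by ring
  have h8 : s - 1 - 7 = s - 8 := by ring
  have h9 : s - 1 - 8 = s - 9 := by ring
  have h10 : s - 1 - 9 = s - 10 := by ring
  rw [h2, h3, h4, h5, h6, h7, h8, h9, h10]
  ring

-- A's inner 10-iteration loop computes exactly the window sum pvW xs s
theorem innerA_eq (xs : List Int) (s : Int) : calcSumsInner xs s = pvW xs s := by
  have hr : PySem.List.pyRange 0 10 1 = [0,1,2,3,4,5,6,7,8,9] := by decide
  have hb : ∀ (r : Int) (s1 : Int),
      (if s - s1 < 0 then r else if s - s1 ≥ PySem.List.len xs then r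
       else r + PySem.List.pyGetD xs (s - s1) 0) = r + pvG xs (s - s1) := by
    intro r s1; unfold pvG
    split_ifs with h1 h2 h3 h4 h5 <;> simp_all <;> omega
  unfold calcSumsInner
  simp only [hr, List.foldl, hb]
  unfold pvW
  norm_num

-- B's step performs exactly one window slide
theorem slideB_eq (xs : List Int) (st : Int × List Int) (s : Int) :
    calcSumsAltStep xs st s
      = (st.1 + pvG xs s - pvG xs (s - 10), st.2 ++ [st.1 + pvG xs s - pvG xs (s - 10)]) := by
  unfold calcSumsAltStep pvG
  split_ifs <;> simp

-- loop characterisations, by induction on the (natural) number of iterations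
theorem loopA (xs : List Int) (m : Nat) :
    (PySem.List.pyRange 0 (m : Int) 1).foldl (fun results s =>
      results ++ [calcSumsInner xs s]) []
    = (List.range m).map (fun k => pvW xs (k : Int)) := by
  induction m with
  | zero => simp [PySem.List.pyRange_one_eq_nil]
  | succ n ih =>
    have h : PySem.List.pyRange 0 ((n : Int) + 1) 1
        = PySem.List.pyRange 0 (n : Int) 1 ++ [(n : Int)] :=
      PySem.List.pyRange_one_succ_right (by omega)
    push_cast
    rw [h, List.foldl_append, ih, List.range_succ]
    simp [innerA_eq]

theorem loopB (xs : List Int) (m : Nat) :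
    (PySem.List.pyRange 0 (m : Int) 1).foldl (calcSumsAltStep xs) ((0 : Int), ([] : List Int))
    = (pvW xs ((m : Int) - 1), (List.range m).map (fun k => pvW xs (k : Int))) := by
  induction m with
  | zero => simp [PySem.List.pyRange_one_eq_nil, pvW_neg_one]
  | succ n ih =>
    have h : PySem.List.pyRange 0 ((n : Int) + 1) 1
        = PySem.List.pyRange 0 (n : Int) 1 ++ [(n : Int)] :=
      PySem.List.pyRange_one_succ_right (by omega)
    push_cast
    rw [h, List.foldl_append, ih, List.foldl_cons, List.foldl_nil, slideB_eq,
        ← pvW_step, List.range_succ]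
    simp

-- ===== VERDICT (by name: the statement is the Claim_ definition above) =====
theorem calcSums_spec : Claim_equal_calcSums := by
  intro maxsum prevSums _
  unfold Spec_calcSums calcSums calcSums_alt
  have hrange : PySem.List.pyRange 0 (maxsum + 1) 1
      = PySem.List.pyRange 0 (((maxsum + 1).toNat : Nat) : Int) 1 := by
    by_cases h : 0 ≤ maxsum + 1
    · rw [Int.toNat_of_nonneg h]
    · rw [PySem.List.pyRange_one_eq_nil (by omega), PySem.List.pyRange_one_eq_nil (by omega)]
  rw [hrange, loopA, loopB]
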